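-- pv_equiv track=rewrite | github.com/AwesomeLemon/api-extraction-scripts | method_name_dataset.py | find_char_from_end
-- ===== SOURCE A (Python) =====
-- def find_char_from_end(s, c_target, num_to_return):
--     c_encounters = 0
--     indices = []
--     for i, c in enumerate(reversed(s)):
--         if c != c_target:
--             continue
--         c_encounters += 1
--         indices.append(len(s) - i)
--         if c_encounters == num_to_return:
--             return indices
--     return indices
-- ===== SOURCE B (Python) =====
-- def find_char_from_end(s, c_target, num_to_return):
--     positions = [i + 1 for i, c in enumerate(s) if c == c_target]
--     positions.reverse()
--     return positions[:num_to_return] if num_to_return >= 1 else positions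
-- ===== Notes on version B (the rewrite author's own statement) =====
-- stated objective: simpler
-- what changed: Replaced the reverse-scan with an occurrence counter and early return by a single forward comprehension collecting i+1 for matches, an in-place reverse, and one conditional slice (all matches when num_to_return < 1).
import Mathlib
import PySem

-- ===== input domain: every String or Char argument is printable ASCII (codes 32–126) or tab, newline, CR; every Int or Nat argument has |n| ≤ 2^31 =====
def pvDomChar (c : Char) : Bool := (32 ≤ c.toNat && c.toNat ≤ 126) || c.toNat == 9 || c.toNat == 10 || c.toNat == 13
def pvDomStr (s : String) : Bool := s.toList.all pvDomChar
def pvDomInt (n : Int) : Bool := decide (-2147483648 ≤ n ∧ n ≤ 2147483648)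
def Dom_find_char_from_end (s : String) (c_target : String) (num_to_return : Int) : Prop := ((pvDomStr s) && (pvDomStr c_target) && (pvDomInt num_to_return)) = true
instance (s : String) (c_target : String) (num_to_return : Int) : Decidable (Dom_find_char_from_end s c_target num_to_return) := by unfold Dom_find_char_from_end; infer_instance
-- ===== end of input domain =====

-- B replaces A's reverse scan with counter and early return by a forward comprehension,
-- a reverse and one conditional slice (objective: simpler).


-- ===== PORT A =====
-- A's loop over enumerate(reversed(s)): i is the running index (Nat, as Python's
-- enumerate index is nonnegative), cnt the occurrence counter; on a match
-- len(s) - i is appended and the loop returns early when cnt+1 == num_to_return.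
def pvALoop (ct : List Char) (len : Int) : List Char → Nat → Int → Int → List Int
  | [], _, _, _ => []
  | c :: rest, i, cnt, num =>
    if [c] ≠ ct then pvALoop ct len rest (i + 1) cnt num
    else if cnt + 1 = num then [len - (i : Int)]
    else (len - (i : Int)) :: pvALoop ct len rest (i + 1) (cnt + 1) num

def find_char_from_end (s : String) (c_target : String) (num_to_return : Int) : List Int :=
  pvALoop c_target.toList (s.toList.length : Int) s.toList.reverse 0 0 num_to_return

-- ===== PORT B =====
-- B: positions = [i+1 for i, c in enumerate(s) if c == c_target]; positions.reverse();
-- positions[:num_to_return] if num_to_return >= 1 else positions.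
def find_char_from_end_alt (s : String) (c_target : String) (num_to_return : Int) : List Int :=
  let positions := ((s.toList.zipIdx).filterMap
    (fun p => if [p.1] = c_target.toList then some ((p.2 : Int) + 1) else none)).reverse
  if num_to_return ≥ 1 then positions.take num_to_return.toNat else positions

-- ===== PRECONDITION & SPEC =====
def Spec_find_char_from_end (s : String) (c_target : String) (num_to_return : Int) (out : List Int) : Prop := out = find_char_from_end_alt s c_target num_to_return
instance (s : String) (c_target : String) (num_to_return : Int) (out : List Int) : Decidable (Spec_find_char_from_end s c_target num_to_return out) := by unfold Spec_find_char_from_end; infer_instance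

-- ===== CLAIM (what is proved, stated in full; the proofs are below) =====
def Claim_equal_find_char_from_end : Prop := ∀ (s : String) (c_target : String) (num_to_return : Int), Dom_find_char_from_end s c_target num_to_return → Spec_find_char_from_end s c_target num_to_return (find_char_from_end s c_target num_to_return)

-- ===== LEMMAS AND PROOFS =====

-- Matching positions of l scanned with index offset k, valued len - index.
def pvRev (ct : List Char) (len : Int) (l : List Char) (k : Nat) : List Int :=
  (l.zipIdx k).filterMap (fun p => if [p.1] = ct then some (len - (p.2 : Int)) else none)

theorem pvRev_nil (ct : List Char) (len : Int) (k : Nat) : pvRev ct len [] k = [] := rfl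

theorem pvRev_cons (ct : List Char) (len : Int) (c : Char) (t : List Char) (k : Nat) :
    pvRev ct len (c :: t) k =
      (if [c] = ct then [len - (k : Int)] else []) ++ pvRev ct len t (k + 1) := by
  simp only [pvRev, List.zipIdx_cons, List.filterMap_cons]
  split <;> simp_all

theorem pvRev_append (ct : List Char) (len : Int) (xs ys : List Char) (k : Nat) :
    pvRev ct len (xs ++ ys) k = pvRev ct len xs k ++ pvRev ct len ys (k + xs.length) := by
  simp [pvRev, List.zipIdx_append, List.filterMap_append]

-- A's loop computes a take-prefix of pvRev (or all of it when num ≤ cnt).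
theorem pvALoop_eq (ct : List Char) (len : Int) (num : Int) :
    ∀ (l : List Char) (k : Nat) (cnt : Int),
      pvALoop ct len l k cnt num =
        if cnt + 1 ≤ num then (pvRev ct len l k).take (num - cnt).toNat
        else pvRev ct len l k := by
  intro l
  induction l with
  | nil => intro k cnt; simp [pvALoop, pvRev_nil]
  | cons c t ih =>
    intro k cnt
    rw [pvRev_cons]
    by_cases hm : [c] = ct
    · simp only [pvALoop, hm, ne_eq, not_true_eq_false, if_false, if_true, List.singleton_append]
      by_cases he : cnt + 1 = num
      · simp [he, show num - cnt = 1 by omega]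
      · rw [if_neg he, ih (k + 1) (cnt + 1)]
        by_cases hle : cnt + 1 ≤ num
        · have hle2 : cnt + 1 + 1 ≤ num := by omega
          rw [if_pos hle2, if_pos hle,
            show (num - cnt).toNat = (num - (cnt + 1)).toNat + 1 by omega]
          simp
        · have : ¬ cnt + 1 + 1 ≤ num := by omega
          rw [if_neg this, if_neg hle]
    · simp only [pvALoop, hm, ne_eq, not_false_eq_true, if_true]
      exact ih (k + 1) cnt

-- B's reversed forward positions are exactly pvRev of the reversed string (offset 0),
-- provided the scan covers positions k .. len of the whole string.
theorem pvFwd_reverse (ct : List Char) (len : Int) :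
    ∀ (l : List Char) (k : Nat), (k : Int) + l.length = len →
      ((l.zipIdx k).filterMap
        (fun p => if [p.1] = ct then some ((p.2 : Int) + 1) else none)).reverse =
      pvRev ct len l.reverse 0 := by
  intro l
  induction l with
  | nil => intro k h; simp [pvRev_nil]
  | cons c t ih =>
    intro k h
    have h' : (k : Int) + 1 + t.length = len := by
      simpa [Nat.cast_add, add_comm, add_left_comm, add_assoc] using h
    simp only [List.zipIdx_cons, List.filterMap_cons, List.reverse_cons]
    have hrev : pvRev ct len (t.reverse ++ [c]) 0 =
        pvRev ct len t.reverse 0 ++ (if [c] = ct then [len - (t.length : Int)] else []) := by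
      rw [pvRev_append, pvRev_cons, pvRev_nil]
      simp
    by_cases hm : [c] = ct
    · have hv : len - (t.length : Int) = (k : Int) + 1 := by
        push_cast at h' ⊢; omega
      simp only [hrev, if_pos hm, List.reverse_cons, hv]
      rw [ih (k + 1) h']
    · simp only [hrev, if_neg hm, List.append_nil]
      exact ih (k + 1) h'

-- ===== VERDICT (by name: the statement is the Claim_ definition above) =====
theorem find_char_from_end_spec : Claim_equal_find_char_from_end := by
  intro s c_target num _
  unfold Spec_find_char_from_end find_char_from_end find_char_from_end_alt
  rw [pvALoop_eq, pvFwd_reverse c_target.toList (s.toList.length : Int) s.toList 0 (by simp)]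
  by_cases h : num ≥ 1
  · rw [if_pos (by omega : (0 : Int) + 1 ≤ num)]
    simp [h]
  · rw [if_neg (by omega : ¬ (0 : Int) + 1 ≤ num)]
    simp [h]
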